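-- pv_equiv track=rewrite | github.com/Yeom-Yeom/CodingTest_Practice | Lv.1/page1/roughly_keyboard.py | roughly_keyboard
-- ===== SOURCE A (Python) =====
-- def roughly_keyboard(keymap, targets):
--     keytable={}
--     for keys in keymap:
--         for i, key in enumerate(keys):
--             if key not in keytable:
--                 keytable[key] = i+1
--             else:
--                 keytable[key] = min(keytable[key],i+1)
--     answer = []
--     for target in targets:
--         clicked=0
--         for key in target:
--             if key not in keytable:
--                 clicked = -1
--                 break
--             clicked+=keytable[key]
--         answer.append(clicked)
--
--     return answer
-- ===== SOURCE B (Python) =====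
-- def roughly_keyboard(keymap, targets):
--     cache = {}
--     answer = []
--     for target in targets:
--         clicked = 0
--         for ch in target:
--             if ch in cache:
--                 best = cache[ch]
--             else:
--                 best = -1
--                 for keys in keymap:
--                     pos = keys.find(ch)
--                     if pos != -1 and (best == -1 or pos + 1 < best):
--                         best = pos + 1
--                 cache[ch] = best
--             if best == -1:
--                 clicked = -1
--                 break
--             clicked += best
--         answer.append(clicked)
--     return answer
-- ===== Notes on version B (the rewrite author's own statement) =====
-- stated objective: alternative
-- what changed: Drops A's eager enumerate-built char->min-position table; B answers each target character by scanning the keymaps directly with str.find for its minimum 1-based position, memoizing the answer per distinct character.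
import Mathlib
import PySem

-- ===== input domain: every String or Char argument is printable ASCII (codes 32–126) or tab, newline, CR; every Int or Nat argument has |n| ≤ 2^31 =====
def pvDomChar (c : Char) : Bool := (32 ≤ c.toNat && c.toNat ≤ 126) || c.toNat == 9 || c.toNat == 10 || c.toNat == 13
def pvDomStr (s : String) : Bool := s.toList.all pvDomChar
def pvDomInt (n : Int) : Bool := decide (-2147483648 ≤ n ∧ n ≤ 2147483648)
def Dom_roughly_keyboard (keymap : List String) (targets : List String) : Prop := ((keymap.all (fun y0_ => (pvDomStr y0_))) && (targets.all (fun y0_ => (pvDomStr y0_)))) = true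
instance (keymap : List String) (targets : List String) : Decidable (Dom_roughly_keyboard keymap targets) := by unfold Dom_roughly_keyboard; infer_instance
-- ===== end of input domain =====

-- B replaces A's precomputed char->min-position dict by a direct per-character scan of all keymaps with str.find (alternative decomposition, similar cost).


-- ===== PORT A =====
-- the inner enumerate loop body: keytable[key] = i+1 if absent else min(keytable[key], i+1)
def pvStepA (kt : PySem.Dict Char Int) (p : Int × Char) : PySem.Dict Char Int :=
  match kt.get? p.2 with
  | none => kt.insert p.2 (p.1 + 1)
  | some v => kt.insert p.2 (min v (p.1 + 1))

def pvBuildTable (keymap : List String) : PySem.Dict Char Int :=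
  keymap.foldl (fun kt keys => (PySem.List.enumerate keys.toList).foldl pvStepA kt) PySem.Dict.empty

-- the per-target loop with its break
def pvClickA (kt : PySem.Dict Char Int) : List Char → Int → Int
  | [], clicked => clicked
  | c :: cs, clicked =>
    match kt.get? c with
    | none => -1
    | some v => pvClickA kt cs (clicked + v)

def roughly_keyboard (keymap : List String) (targets : List String) : List Int :=
  let keytable := pvBuildTable keymap
  targets.foldl (fun answer target => answer ++ [pvClickA keytable target.toList 0]) []

-- ===== PORT B =====
-- minimum 1-based position of c across all keymaps, -1 if absent everywhere (the inner scan)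
def pvBestScan (keymap : List String) (c : Char) : Int :=
  keymap.foldl (fun best keys =>
    let pos := PySem.Str.find keys (String.ofList [c])
    if pos ≠ -1 ∧ (best = -1 ∨ pos + 1 < best) then pos + 1 else best) (-1)

-- the memoized lookup: cache hit, or scan and record
def pvBestC (keymap : List String) (cache : PySem.Dict Char Int) (c : Char) : Int × PySem.Dict Char Int :=
  match cache.get? c with
  | some v => (v, cache)
  | none =>
    let b := pvBestScan keymap c
    (b, cache.insert c b)

-- the per-target loop with its break, threading the cache
def pvClickB (keymap : List String) : List Char → Int → PySem.Dict Char Int → Int × PySem.Dict Char Int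
  | [], clicked, cache => (clicked, cache)
  | c :: cs, clicked, cache =>
    let r := pvBestC keymap cache c
    if r.1 = -1 then (-1, r.2) else pvClickB keymap cs (clicked + r.1) r.2

def roughly_keyboard_alt (keymap : List String) (targets : List String) : List Int :=
  (targets.foldl (fun st target =>
    let r := pvClickB keymap target.toList 0 st.2
    (st.1 ++ [r.1], r.2)) (([] : List Int), (PySem.Dict.empty : PySem.Dict Char Int))).1

-- ===== PRECONDITION & SPEC =====
def Spec_roughly_keyboard (keymap : List String) (targets : List String) (out : List Int) : Prop := out = roughly_keyboard_alt keymap targets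
instance (keymap : List String) (targets : List String) (out : List Int) : Decidable (Spec_roughly_keyboard keymap targets out) := by unfold Spec_roughly_keyboard; infer_instance

-- ===== CLAIM (what is proved, stated in full; the proofs are below) =====
def Claim_equal_roughly_keyboard : Prop := ∀ (keymap : List String) (targets : List String), Dom_roughly_keyboard keymap targets → Spec_roughly_keyboard keymap targets (roughly_keyboard keymap targets)

-- ===== LEMMAS AND PROOFS =====

-- first 1-based position (≥ k+1) of c in cs, scanning from offset k
def pvFirstIdx (c : Char) : List Char → Int → Option Int
  | [], _ => none
  | x :: xs, k => if x = c then some (k + 1) else pvFirstIdx c xs (k + 1)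

-- option-min: the value A's keytable holds for c after merging the occurrences seen so far
def pvMergeO : Option Int → Option Int → Option Int
  | none, p => p
  | some v, none => some v
  | some v, some w => some (min v w)

theorem pvFirstIdx_ge (c : Char) : ∀ (cs : List Char) (k p : Int), pvFirstIdx c cs k = some p → k + 1 ≤ p := by
  intro cs
  induction cs with
  | nil => intro k p h; simp [pvFirstIdx] at h
  | cons x xs ih =>
    intro k p h
    simp only [pvFirstIdx] at h
    split at h
    · cases h; omega
    · have := ih (k + 1) p h; omega

theorem pvFind_go_single (c : Char) : ∀ (cs : List Char) (k : Nat),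
    PySem.Chars.find.go [c] cs k = (match pvFirstIdx c cs (k : Int) with | none => -1 | some p => p - 1) := by
  intro cs
  induction cs with
  | nil => intro k; simp [PySem.Chars.find.go, pvFirstIdx]
  | cons x xs ih =>
    intro k
    rw [PySem.Chars.find.go]
    by_cases hx : x = c
    · subst hx
      simp [List.isPrefixOf, pvFirstIdx]
    · have hpre : List.isPrefixOf [c] (x :: xs) = false := by
        simp [List.isPrefixOf]
        exact fun h => absurd h.symm hx
      rw [hpre]
      simp only [Bool.false_eq_true, if_false, ih (k + 1), pvFirstIdx, if_neg hx]
      have : ((k : Int) + 1) = ((k + 1 : Nat) : Int) := by push_cast; ring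
      rw [this]

theorem pvFind_single (c : Char) (s : String) :
    PySem.Str.find s (String.ofList [c]) = (match pvFirstIdx c s.toList 0 with | none => -1 | some p => p - 1) := by
  simp only [PySem.Str.find, PySem.Chars.find, String.toList_ofList]
  exact pvFind_go_single c s.toList 0

-- the relation between A's table entry for c and B's running best
def pvRel (o : Option Int) (b : Int) : Prop :=
  (o = none ∧ b = -1) ∨ (∃ v, o = some v ∧ b = v ∧ 1 ≤ v)

theorem pvInner (c : Char) : ∀ (cs : List Char) (n : Int) (d : PySem.Dict Char Int),
    ((PySem.List.enumerate cs n).foldl pvStepA d).get? c = pvMergeO (d.get? c) (pvFirstIdx c cs n) := by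
  intro cs
  induction cs with
  | nil =>
    intro n d
    simp only [PySem.List.enumerate, List.foldl_nil, pvFirstIdx]
    cases d.get? c <;> simp [pvMergeO]
  | cons x xs ih =>
    intro n d
    rw [PySem.List.enumerate_cons, List.foldl_cons, ih]
    by_cases hx : x = c
    · subst hx
      cases h : d.get? x with
      | none =>
        have hstep : (pvStepA d (n, x)).get? x = some (n + 1) := by
          simp [pvStepA, h, PySem.Dict.get?_insert_self]
        rw [hstep]
        simp only [pvFirstIdx, reduceIte]
        cases hfi : pvFirstIdx x xs (n + 1) with
        | none => simp [pvMergeO]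
        | some p =>
          have hp := pvFirstIdx_ge x xs (n + 1) p hfi
          simp only [pvMergeO]
          congr 1
          omega
      | some v =>
        have hstep : (pvStepA d (n, x)).get? x = some (min v (n + 1)) := by
          simp [pvStepA, h, PySem.Dict.get?_insert_self]
        rw [hstep]
        simp only [pvFirstIdx, reduceIte]
        cases hfi : pvFirstIdx x xs (n + 1) with
        | none => simp [pvMergeO]
        | some p =>
          have hp := pvFirstIdx_ge x xs (n + 1) p hfi
          simp only [pvMergeO]
          congr 1
          omega
    · have hcx : c ≠ x := fun h => hx h.symm
      have hstep : (pvStepA d (n, x)).get? c = d.get? c := by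
        unfold pvStepA
        cases h : d.get? x with
        | none => exact PySem.Dict.get?_insert_of_ne d _ hcx
        | some v => exact PySem.Dict.get?_insert_of_ne d _ hcx
      rw [hstep]
      simp [pvFirstIdx, hx]

theorem pvStep_rel (c : Char) (s : String) (d : PySem.Dict Char Int) (b : Int)
    (h : pvRel (d.get? c) b) :
    pvRel (((PySem.List.enumerate s.toList).foldl pvStepA d).get? c)
      (if PySem.Str.find s (String.ofList [c]) ≠ -1 ∧ (b = -1 ∨ PySem.Str.find s (String.ofList [c]) + 1 < b)
       then PySem.Str.find s (String.ofList [c]) + 1 else b) := by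
  rw [pvInner c s.toList 0 d]
  cases hfi : pvFirstIdx c s.toList 0 with
  | none =>
    have hf : PySem.Str.find s (String.ofList [c]) = -1 := by rw [pvFind_single c s, hfi]
    rw [hf, if_neg (by simp)]
    rcases h with ⟨ho, hb⟩ | ⟨v, ho, hb, hv⟩
    · rw [ho]; exact Or.inl ⟨rfl, hb⟩
    · rw [ho]; exact Or.inr ⟨v, rfl, hb, hv⟩
  | some p =>
    have hp : 1 ≤ p := by have := pvFirstIdx_ge c s.toList 0 p hfi; omega
    have hf : PySem.Str.find s (String.ofList [c]) = p - 1 := by rw [pvFind_single c s, hfi]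
    have hpe : p - 1 + 1 = p := by omega
    have hpos : p - 1 ≠ (-1 : Int) := by omega
    rw [hf, hpe]
    rcases h with ⟨ho, hb⟩ | ⟨v, ho, hb, hv⟩
    · subst hb
      rw [ho, if_pos ⟨hpos, Or.inl rfl⟩]
      exact Or.inr ⟨p, rfl, rfl, hp⟩
    · subst hb
      rw [ho]
      simp only [pvMergeO]
      by_cases hlt : p < b
      · rw [if_pos ⟨hpos, Or.inr hlt⟩]
        exact Or.inr ⟨min b p, rfl, by omega, by omega⟩
      · rw [if_neg (by rintro ⟨-, h2 | h2⟩ <;> omega)]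
        exact Or.inr ⟨min b p, rfl, by omega, by omega⟩

theorem pvTable_rel (c : Char) : ∀ (keymap : List String) (d : PySem.Dict Char Int) (b : Int),
    pvRel (d.get? c) b →
    pvRel ((keymap.foldl (fun kt keys => (PySem.List.enumerate keys.toList).foldl pvStepA kt) d).get? c)
          (keymap.foldl (fun best keys =>
            let pos := PySem.Str.find keys (String.ofList [c])
            if pos ≠ -1 ∧ (best = -1 ∨ pos + 1 < best) then pos + 1 else best) b) := by
  intro keymap
  induction keymap with
  | nil => intro d b h; simpa using h
  | cons s rest ih =>
    intro d b h
    simp only [List.foldl_cons]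
    exact ih _ _ (pvStep_rel c s d b h)

theorem pvBest_rel (keymap : List String) (c : Char) :
    pvRel ((pvBuildTable keymap).get? c) (pvBestScan keymap c) := by
  unfold pvBuildTable pvBestScan
  exact pvTable_rel c keymap PySem.Dict.empty (-1) (Or.inl ⟨PySem.Dict.get?_empty c, rfl⟩)

-- the cache only ever holds correct scan results
def pvCacheInv (keymap : List String) (cache : PySem.Dict Char Int) : Prop :=
  ∀ c v, cache.get? c = some v → v = pvBestScan keymap c

theorem pvBestC_spec (keymap : List String) (cache : PySem.Dict Char Int) (c : Char)
    (hinv : pvCacheInv keymap cache) :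
    (pvBestC keymap cache c).1 = pvBestScan keymap c ∧ pvCacheInv keymap (pvBestC keymap cache c).2 := by
  unfold pvBestC
  cases h : cache.get? c with
  | some v => exact ⟨hinv c v h, hinv⟩
  | none =>
    refine ⟨rfl, fun c' v' h' => ?_⟩
    rw [PySem.Dict.get?_insert] at h'
    split at h'
    · cases h'; subst ‹c' = c›; rfl
    · exact hinv c' v' h'

theorem pvClick_eq (keymap : List String) : ∀ (cs : List Char) (acc : Int) (cache : PySem.Dict Char Int),
    pvCacheInv keymap cache →
    (pvClickB keymap cs acc cache).1 = pvClickA (pvBuildTable keymap) cs acc ∧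
      pvCacheInv keymap (pvClickB keymap cs acc cache).2 := by
  intro cs
  induction cs with
  | nil => intro acc cache hinv; exact ⟨rfl, hinv⟩
  | cons c rest ih =>
    intro acc cache hinv
    obtain ⟨hb, hinv'⟩ := pvBestC_spec keymap cache c hinv
    simp only [pvClickB, pvClickA, hb]
    rcases pvBest_rel keymap c with ⟨ho, hv⟩ | ⟨v, ho, hv, h1⟩
    · simp [ho, hv, hinv']
    · rw [ho, hv, if_neg (by omega)]
      exact ih (acc + v) _ hinv'

theorem pvFold_eq (keymap : List String) : ∀ (ts : List String) (ans : List Int) (cache : PySem.Dict Char Int),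
    pvCacheInv keymap cache →
    (ts.foldl (fun st target =>
      let r := pvClickB keymap target.toList 0 st.2
      (st.1 ++ [r.1], r.2)) (ans, cache)).1 =
      ans ++ ts.map (fun t => pvClickA (pvBuildTable keymap) t.toList 0) := by
  intro ts
  induction ts with
  | nil => intro ans cache _; simp
  | cons t rest ih =>
    intro ans cache hinv
    obtain ⟨hfst, hinv'⟩ := pvClick_eq keymap t.toList 0 cache hinv
    simp only [List.foldl_cons, List.map_cons]
    rw [ih _ _ hinv', hfst]
    simp

-- ===== VERDICT (by name: the statement is the Claim_ definition above) =====
theorem roughly_keyboard_spec : Claim_equal_roughly_keyboard := by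
  intro keymap targets _
  unfold Spec_roughly_keyboard roughly_keyboard roughly_keyboard_alt
  rw [pvFold_eq keymap targets [] PySem.Dict.empty
    (fun c v h => by rw [PySem.Dict.get?_empty] at h; cases h)]
  simp only [PySem.List.foldl_append_singleton_eq_map, List.nil_append]
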